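-- pv_equiv track=rewrite | github.com/rickyurvinauc/IIC1103_2025_I | clases/Clase22_archivos/I2/p5.py | numero_posibles
-- ===== SOURCE A (Python) =====
-- def verificar_t(indice_f, indice_c, tablero):
--     pos_b_1 = [indice_f + 1,indice_c]
--     pos_b_2 = [indice_f + 2, indice_c]
--     pos_f_c = [indice_f + 1, indice_c + 1]
--     lista = [pos_b_1, pos_b_2, pos_f_c]
--     for pos in lista:
--         if pos[0] >= len(tablero) or pos[1]>= len(tablero[0]):
--             return False
--         letra_t = tablero[pos[0]][pos[1]]
--         if letra_t != 0:
--             return False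
--     return True
--
-- def numero_posibles(tablero):
--     indice_f = 0
--     cant = 0
--     for fila in tablero:
--         indice_c = 0
--         for col in fila:
--             if col == 0:
--                 res = verificar_t(indice_f, indice_c, tablero)
--                 if res == True:
--                     cant += 1
--             indice_c += 1
--         indice_f += 1
--     return cant
-- ===== SOURCE B (Python) =====
-- def numero_posibles(tablero):
--     # Row-window sweep: zip each row with the two rows below it, then zip the
--     # four relevant column streams; no index arithmetic or bounds checks needed.
--     total = 0
--     for r0, r1, r2 in zip(tablero, tablero[1:], tablero[2:]):
--         for a, b, c, d in zip(r0, r1, r2, r1[1:]):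
--             if a == 0 and b == 0 and c == 0 and d == 0:
--                 total += 1
--     return total
-- ===== Notes on version B (the rewrite author's own statement) =====
-- stated objective: alternative
-- what changed: Replaces A's per-cell helper (global indexing with explicit bounds checks against len(tablero) and len(tablero[0])) by a sliding 3-row window: zip each row with the two rows below it and zip the four relevant column streams, so all bounds handling disappears into zip truncation.
-- outside the precondition, e.g. on numero_posibles([[0], [0, 0], [0]]): A returns 0, B returns 1; on numero_posibles([[0, 0], [0], [0, 0]]): A raises IndexError, B returns 0
import Mathlib
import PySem

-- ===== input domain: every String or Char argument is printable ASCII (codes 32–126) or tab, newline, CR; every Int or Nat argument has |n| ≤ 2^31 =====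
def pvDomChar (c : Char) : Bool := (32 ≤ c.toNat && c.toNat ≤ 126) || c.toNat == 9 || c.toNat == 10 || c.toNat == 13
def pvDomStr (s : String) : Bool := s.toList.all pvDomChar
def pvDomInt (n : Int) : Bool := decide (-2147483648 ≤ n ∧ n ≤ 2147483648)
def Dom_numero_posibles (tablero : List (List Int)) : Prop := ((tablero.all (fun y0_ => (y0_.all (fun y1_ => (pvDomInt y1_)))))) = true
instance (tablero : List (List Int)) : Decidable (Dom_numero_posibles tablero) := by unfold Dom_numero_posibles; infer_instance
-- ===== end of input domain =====

-- B replaces A's per-cell helper (global indexing with bounds checks) by a sliding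
-- 3-row window of zipped rows, an alternative decomposition; equal on rectangular boards (Pre_).

-- ===== PORT A =====
-- Python loop over the literal 3-element position list with early returns = short-circuit List.all.
-- tablero[pos[0]][pos[1]] via pyGet?; the .getD defaults are only reached where Python raises
-- (ragged boards, excluded by Pre_) or after the bounds check has already failed.
def verificar_t (indice_f indice_c : Int) (tablero : List (List Int)) : Bool :=
  let pos_b_1 := (indice_f + 1, indice_c)
  let pos_b_2 := (indice_f + 2, indice_c)
  let pos_f_c := (indice_f + 1, indice_c + 1)
  let lista := [pos_b_1, pos_b_2, pos_f_c]
  lista.all (fun pos =>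
    if pos.1 ≥ (tablero.length : Int) ∨ pos.2 ≥ (((tablero.headD []).length : Nat) : Int) then false
    else
      let letra_t := (PySem.List.pyGet? ((PySem.List.pyGet? tablero pos.1).getD []) pos.2).getD 0
      if letra_t ≠ 0 then false else true)

def numero_posibles (tablero : List (List Int)) : Int :=
  (tablero.foldl
    (fun (st : Int × Int) fila =>
      (st.1 + 1,
        (fila.foldl
          (fun (st2 : Int × Int) col =>
            (st2.1 + 1,
              if col = 0 then
                (if verificar_t st.1 st2.1 tablero then st2.2 + 1 else st2.2)
              else st2.2))
          (0, st.2)).2))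
    (0, 0)).2

-- ===== PORT B =====
def numero_posibles_alt (tablero : List (List Int)) : Int :=
  (List.zip tablero (List.zip (tablero.drop 1) (tablero.drop 2))).foldl
    (fun total r =>
      (List.zip r.1 (List.zip r.2.1 (List.zip r.2.2 (r.2.1.drop 1)))).foldl
        (fun t q =>
          if q.1 = 0 ∧ q.2.1 = 0 ∧ q.2.2.1 = 0 ∧ q.2.2.2 = 0 then t + 1 else t)
        total)
    0

-- ===== PRECONDITION & SPEC =====
-- Pre_ admits rectangular boards (the natural domain) and all boards of at most two rows on which
-- A returns (trivially 0, a T needs three rows); it excludes the remaining ragged (non-rectangular)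
-- boards, where A bounds-checks every row against the first row's length, so it raises IndexError
-- on some of them and on others skips/accepts columns by accident of the first row's length.
def Pre_numero_posibles (tablero : List (List Int)) : Prop :=
  (∀ r ∈ tablero, r.length = (tablero.headD []).length)
  ∨ tablero.length ≤ 1
  ∨ (tablero.length = 2 ∧
      ∀ c < (tablero.headD []).length,
        (tablero.headD []).getD c 1 = 0 → c < (tablero.getD 1 []).length)
instance (tablero : List (List Int)) : Decidable (Pre_numero_posibles tablero) := by
  unfold Pre_numero_posibles; infer_instance

def pvWitness_numero_posibles : List (List Int) := [[0, 1, 0], [0, 0, 0], [0, 2, 0]]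

def Spec_numero_posibles (tablero : List (List Int)) (out : Int) : Prop := out = numero_posibles_alt tablero
instance (tablero : List (List Int)) (out : Int) : Decidable (Spec_numero_posibles tablero out) := by unfold Spec_numero_posibles; infer_instance

-- ===== CLAIM (what is proved, stated in full; the proofs are below) =====
def Claim_equal_numero_posibles : Prop := ∀ (tablero : List (List Int)), Dom_numero_posibles tablero → Pre_numero_posibles tablero → Spec_numero_posibles tablero (numero_posibles tablero)

-- ===== LEMMAS AND PROOFS =====

-- common spec: recursive count over 3-row windows
def rowCount (r0 r1 r2 : List Int) : Int :=
  (List.zip r0 (List.zip r1 (List.zip r2 (r1.drop 1)))).foldl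
    (fun t q =>
      if q.1 = 0 ∧ q.2.1 = 0 ∧ q.2.2.1 = 0 ∧ q.2.2.2 = 0 then t + 1 else t)
    0

def count3 : List (List Int) → Int
  | r0 :: r1 :: r2 :: rest => rowCount r0 r1 r2 + count3 (r1 :: r2 :: rest)
  | _ => 0

-- relative (head-structural) form of rowCount
def rowCountR : List Int → List Int → List Int → Int
  | a :: s0, b :: b2 :: s1, c :: s2 =>
      (if a = 0 ∧ b = 0 ∧ c = 0 ∧ b2 = 0 then 1 else 0) + rowCountR s0 (b2 :: s1) s2
  | _, _, _ => 0

-- A-side reference sums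
def innSum (tablero : List (List Int)) (f : Int) : List Int → Nat → Int
  | [], _ => 0
  | col :: rest, j =>
      (if col = 0 ∧ verificar_t f (j : Int) tablero then 1 else 0) + innSum tablero f rest (j + 1)

def outSum (tablero : List (List Int)) : List (List Int) → Nat → Int
  | [], _ => 0
  | fila :: rest, f => innSum tablero (f : Int) fila 0 + outSum tablero rest (f + 1)

theorem innSum_foldl (tablero : List (List Int)) (f : Int) :
    ∀ (fila : List Int) (j : Nat) (cant : Int),
      (fila.foldl
        (fun (st2 : Int × Int) col =>
          (st2.1 + 1,
            if col = 0 then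
              (if verificar_t f st2.1 tablero then st2.2 + 1 else st2.2)
            else st2.2))
        ((j : Int), cant))
      = ((j : Int) + fila.length, cant + innSum tablero f fila j) := by
  intro fila
  induction fila with
  | nil => intro j cant; simp [innSum]
  | cons col rest ih =>
    intro j cant
    simp only [List.foldl_cons]
    have : ((j : Int) + 1) = ((j + 1 : Nat) : Int) := by push_cast; ring
    rw [this, ih (j + 1)]
    simp [innSum]
    constructor
    · push_cast; ring
    · by_cases h1 : col = 0 <;> by_cases h2 : verificar_t f (j : Int) tablero = true <;>
        simp [h1, h2] <;> ring

theorem outSum_foldl (tablero : List (List Int)) :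
    ∀ (rows : List (List Int)) (f : Nat) (cant : Int),
      (rows.foldl
        (fun (st : Int × Int) fila =>
          (st.1 + 1,
            (fila.foldl
              (fun (st2 : Int × Int) col =>
                (st2.1 + 1,
                  if col = 0 then
                    (if verificar_t st.1 st2.1 tablero then st2.2 + 1 else st2.2)
                  else st2.2))
              (0, st.2)).2))
        ((f : Int), cant))
      = ((f : Int) + rows.length, cant + outSum tablero rows f) := by
  intro rows
  induction rows with
  | nil => intro f cant; simp [outSum]
  | cons fila rest ih =>
    intro f cant
    simp only [List.foldl_cons]
    have h0 : ((0 : Int), cant) = (((0 : Nat) : Int), cant) := by norm_num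
    rw [h0, innSum_foldl tablero (f : Int) fila 0 cant]
    have : ((f : Int) + 1) = ((f + 1 : Nat) : Int) := by push_cast; ring
    rw [this, ih (f + 1)]
    simp [outSum]
    constructor
    · push_cast; ring
    · ring

theorem numero_posibles_eq_outSum (tablero : List (List Int)) :
    numero_posibles tablero = outSum tablero tablero 0 := by
  unfold numero_posibles
  have h0 : ((0 : Int), (0 : Int)) = (((0 : Nat) : Int), (0 : Int)) := by norm_num
  rw [h0, outSum_foldl tablero tablero 0 0]
  simp

-- verificar_t is false when fewer than two rows lie below row k
theorem verificar_false_of_short (tablero : List (List Int)) (k j : Nat)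
    (hshort : tablero.length ≤ k + 2) :
    verificar_t (k : Int) (j : Int) tablero = false := by
  have h2 : ((k : Int) + 2 ≥ (tablero.length : Int)) := by omega
  simp [verificar_t, h2]

-- verificar_t characterised through the two rows below row k (rectangular board)
theorem verificar_char (tablero : List (List Int)) (w : Nat)
    (hhead : (tablero.headD []).length = w)
    (k j : Nat) (r1 r2 : List Int) (rest2 : List (List Int))
    (hdrop : tablero.drop (k + 1) = r1 :: r2 :: rest2)
    (hr1 : r1.length = w) :
    verificar_t (k : Int) (j : Int) tablero =
      decide (j + 1 < w ∧ r1.getD j 0 = 0 ∧ r2.getD j 0 = 0 ∧ r1.getD (j + 1) 0 = 0) := by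
  have hlen : tablero.length = k + 3 + rest2.length := by
    have := congrArg List.length hdrop
    simp [List.length_drop] at this
    omega
  have hget1 : tablero[k + 1]? = some r1 := by
    have : (tablero.drop (k + 1))[0]? = tablero[k + 1 + 0]? := List.getElem?_drop ..
    simp [hdrop] at this
    simpa using this.symm
  have hget2 : tablero[k + 2]? = some r2 := by
    have : (tablero.drop (k + 1))[1]? = tablero[k + 1 + 1]? := List.getElem?_drop ..
    simp [hdrop] at this
    rw [show k + 2 = k + 1 + 1 by omega]
    exact this.symm
  have hc1 : ((k : Int) + 1) = ((k + 1 : Nat) : Int) := by push_cast; ring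
  have hc2 : ((k : Int) + 2) = ((k + 2 : Nat) : Int) := by push_cast; ring
  have hcj : ((j : Int) + 1) = ((j + 1 : Nat) : Int) := by push_cast; ring
  simp only [verificar_t, List.all_cons, List.all_nil, Bool.and_true, hhead, hc1, hc2, hcj,
    PySem.List.pyGet?_natCast, hget1, hget2, Option.getD_some]
  have A1 : ¬ ((tablero.length : Int) ≤ (k : Int) + 1) := by push_cast; omega
  have A2 : ¬ ((tablero.length : Int) ≤ (k : Int) + 2) := by push_cast; omega
  have e1 : r1.getD j 0 = r1[j]?.getD 0 := List.getD_eq_getElem?_getD ..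
  have e2 : r1.getD (j + 1) 0 = r1[j + 1]?.getD 0 := List.getD_eq_getElem?_getD ..
  have e3 : r2.getD j 0 = r2[j]?.getD 0 := List.getD_eq_getElem?_getD ..
  by_cases hj1 : j + 1 < w
  · have B1 : ¬ (w ≤ j) := by omega
    have B2 : ¬ ((w : Int) ≤ (j : Int) + 1) := by push_cast; omega
    simp [A1, A2, B1, B2, hj1, e1, e2, e3, Bool.and_assoc]
  · have B2 : ((w : Int) ≤ (j : Int) + 1) := by push_cast; omega
    by_cases hj : j < w
    · have B1 : ¬ (w ≤ j) := by omega
      simp [A1, A2, B1, B2, hj1, e1, e2, e3]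
    · have B1 : (w ≤ j) := by omega
      simp [A1, A2, B1, B2, hj1]

theorem innSum_zero_of_short (tablero : List (List Int)) (k : Nat)
    (hshort : tablero.length ≤ k + 2) :
    ∀ (s0 : List Int) (d : Nat), innSum tablero (k : Int) s0 d = 0 := by
  intro s0
  induction s0 with
  | nil => intro d; simp [innSum]
  | cons a s0' ih =>
    intro d
    rw [innSum, verificar_false_of_short tablero k d hshort, ih (d + 1)]
    simp

-- inner loop of A on row k equals rowCountR of the synchronous drops of the two rows below
theorem innSum_eq_rowCountR (tablero : List (List Int)) (w : Nat)
    (hhead : (tablero.headD []).length = w)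
    (k : Nat) (r1 r2 : List Int) (rest2 : List (List Int))
    (hdrop : tablero.drop (k + 1) = r1 :: r2 :: rest2)
    (hr1 : r1.length = w) (hr2 : r2.length = w) :
    ∀ (s0 : List Int) (d : Nat) (s1 s2 : List Int),
      s0.length + d = w → s1 = r1.drop d → s2 = r2.drop d →
      innSum tablero (k : Int) s0 d = rowCountR s0 s1 s2 := by
  intro s0
  induction s0 with
  | nil =>
    intro d s1 s2 hlen hs1 hs2
    subst hs1 hs2
    rw [innSum, rowCountR.eq_def]
  | cons a s0' ih =>
    intro d s1 s2 hlen hs1 hs2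
    have hd : d < w := by simp at hlen; omega
    have hs1' : s1 = r1[d] :: r1.drop (d + 1) := by
      rw [hs1, List.drop_eq_getElem_cons (by omega)]
    have hs2' : s2 = r2[d] :: r2.drop (d + 1) := by
      rw [hs2, List.drop_eq_getElem_cons (by omega)]
    rw [innSum, verificar_char tablero w hhead k d r1 r2 rest2 hdrop hr1]
    by_cases hd1 : d + 1 < w
    · have hs1'' : r1.drop (d + 1) = r1[d + 1] :: r1.drop (d + 2) := by
        rw [List.drop_eq_getElem_cons (by omega)]
      rw [hs1', hs1'', hs2', rowCountR]
      rw [← hs1'',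
        ← ih (d + 1) (r1.drop (d + 1)) (r2.drop (d + 1)) (by simp at hlen ⊢; omega) rfl rfl]
      have hg1 : r1.getD d 0 = r1[d] := List.getD_eq_getElem r1 0 (by omega)
      have hg2 : r2.getD d 0 = r2[d] := List.getD_eq_getElem r2 0 (by omega)
      have hg3 : r1.getD (d + 1) 0 = r1[d + 1] := List.getD_eq_getElem r1 0 (by omega)
      have q1 : r1[d]? = some r1[d] := List.getElem?_eq_getElem (by omega)
      have q2 : r2[d]? = some r2[d] := List.getElem?_eq_getElem (by omega)
      have q3 : r1[d + 1]? = some r1[d + 1] := List.getElem?_eq_getElem (by omega)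
      by_cases c0 : a = 0 <;> by_cases c1 : r1[d] = 0 <;> by_cases c2 : r2[d] = 0 <;>
        by_cases c3 : r1[d + 1] = 0 <;>
        simp [c0, c1, c2, c3, hd1, hg1, hg2, hg3, q1, q2, q3]
    · have hs0' : s0' = [] := by
        cases s0' with
        | nil => rfl
        | cons x xs => simp at hlen; omega
      have hdrop1 : r1.drop (d + 1) = [] := List.drop_eq_nil_of_le (by omega)
      subst hs0'
      rw [hs1', hdrop1, hs2', rowCountR.eq_def]
      simp [innSum, hd1]

theorem rowCount_countP (r0 r1 r2 : List Int) :
    rowCount r0 r1 r2 =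
      ((List.zip r0 (List.zip r1 (List.zip r2 (r1.drop 1)))).countP
        (fun q => decide (q.1 = 0 ∧ q.2.1 = 0 ∧ q.2.2.1 = 0 ∧ q.2.2.2 = 0)) : Int) := by
  rw [rowCount, PySem.List.foldl_ite_add_one]; ring

theorem rowCount_eq_rowCountR : ∀ (r0 r1 r2 : List Int), rowCount r0 r1 r2 = rowCountR r0 r1 r2 := by
  intro r0 r1 r2
  induction r0, r1, r2 using rowCountR.induct with
  | case1 a s0 b b2 s1 c s2 ih =>
    rw [rowCountR, ← ih, rowCount_countP, rowCount_countP]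
    simp only [List.drop_one, List.tail_cons, List.zip_cons_cons, List.countP_cons]
    by_cases h : a = 0 ∧ b = 0 ∧ c = 0 ∧ b2 = 0 <;> simp [h] <;> push_cast <;> ring
  | case2 r0 r1 r2 h =>
    rw [rowCountR.eq_def]
    match r0, r1, r2 with
    | [], _, _ => simp [rowCount]
    | _ :: _, [], _ => simp [rowCount]
    | _ :: _, [_], _ => simp [rowCount]
    | _ :: _, _ :: _ :: _, [] => simp [rowCount]
    | a :: s0, b :: b2 :: s1, c :: s2 => exact (h a s0 b b2 s1 c s2 rfl rfl rfl).elim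

-- outSum over the suffix starting at row k equals count3 of that suffix
theorem outSum_eq_count3 (tablero : List (List Int)) (w : Nat)
    (hw : ∀ r ∈ tablero, r.length = w)
    (hhead : (tablero.headD []).length = w) :
    ∀ (rows : List (List Int)) (k : Nat), rows = tablero.drop k →
      outSum tablero rows k = count3 rows := by
  intro rows
  induction rows with
  | nil => intro k h; rw [outSum, count3.eq_def]
  | cons fila rest ih =>
    intro k h
    have hfila : fila ∈ tablero := by
      exact List.drop_subset k tablero (h ▸ List.mem_cons_self)
    have hrest : rest = tablero.drop (k + 1) := by
      have := congrArg List.tail h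
      simpa [List.tail_drop] using this
    have hn : tablero.length - k = rest.length + 1 := by
      have := congrArg List.length h
      simp [List.length_drop] at this
      omega
    match rest, hrest, ih with
    | [], hrest, ih =>
      rw [outSum, outSum, count3.eq_def]
      have : tablero.length ≤ k + 2 := by
        have := congrArg List.length hrest
        simp [List.length_drop] at this
        omega
      rw [innSum_zero_of_short tablero k this fila 0]
      simp
    | [r1], hrest, ih =>
      rw [outSum, outSum, outSum, count3.eq_def]
      have h1 : tablero.length ≤ k + 2 := by
        have := congrArg List.length hrest
        simp [List.length_drop] at this
        omega
      rw [innSum_zero_of_short tablero k h1 fila 0,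
        innSum_zero_of_short tablero (k + 1) (by omega) r1 0]
      simp
    | r1 :: r2 :: rest2, hrest, ih =>
      rw [outSum, count3]
      have hsub : r1 ∈ tablero ∧ r2 ∈ tablero := by
        constructor
        · exact List.drop_subset (k + 1) tablero (hrest ▸ List.mem_cons_self)
        · exact List.drop_subset (k + 1) tablero
            (hrest ▸ List.mem_cons_of_mem r1 List.mem_cons_self)
      rw [innSum_eq_rowCountR tablero w hhead k r1 r2 rest2 hrest.symm
            (hw r1 hsub.1) (hw r2 hsub.2) fila 0 r1 r2
            (by simpa using hw fila hfila) (by simp) (by simp),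
        ← rowCount_eq_rowCountR, ih (k + 1) hrest]

theorem altFold (tablero : List (List Int)) :
    ∀ (acc : Int),
      (List.zip tablero (List.zip (tablero.drop 1) (tablero.drop 2))).foldl
        (fun total r =>
          (List.zip r.1 (List.zip r.2.1 (List.zip r.2.2 (r.2.1.drop 1)))).foldl
            (fun t q =>
              if q.1 = 0 ∧ q.2.1 = 0 ∧ q.2.2.1 = 0 ∧ q.2.2.2 = 0 then t + 1 else t)
            total)
        acc = acc + count3 tablero := by
  induction tablero using count3.induct with
  | case1 r0 r1 r2 rest ih =>
    intro acc
    simp only [List.drop_one, List.tail_cons, List.drop_succ_cons, List.drop_zero,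
      List.zip_cons_cons, List.foldl_cons] at ih ⊢
    rw [PySem.List.foldl_ite_add_one, ih, count3, rowCount_countP]
    simp only [List.drop_one, List.tail_cons, List.zip_cons_cons]
    ring
  | case2 tablero h =>
    intro acc
    rw [count3.eq_def]
    match tablero, h with
    | [], _ => simp
    | [r0], _ => simp
    | [r0, r1], _ => simp
    | r0 :: r1 :: r2 :: rest, h => exact (h r0 r1 r2 rest rfl).elim

theorem alt_eq_count3 (tablero : List (List Int)) : numero_posibles_alt tablero = count3 tablero := by
  rw [numero_posibles_alt, altFold]; ring

theorem outSum_self_short (tab : List (List Int)) (h : tab.length ≤ 2) :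
    outSum tab tab 0 = 0 := by
  match tab, h with
  | [], _ => rw [outSum]
  | [r], h =>
    rw [outSum, outSum, innSum_zero_of_short [r] 0 (by simp) r 0]
    norm_num
  | [r, s], h =>
    rw [outSum, outSum, outSum, innSum_zero_of_short [r, s] 0 (by simp) r 0,
      innSum_zero_of_short [r, s] 1 (by simp) s 0]
    norm_num

theorem count3_short (tab : List (List Int)) (h : tab.length ≤ 2) : count3 tab = 0 := by
  match tab, h with
  | [], _ => rw [count3.eq_def]
  | [r], _ => rw [count3.eq_def]
  | [r, s], _ => rw [count3.eq_def]

-- ===== VERDICT (by name: the statement is the Claim_ definition above) =====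
theorem numero_posibles_spec : Claim_equal_numero_posibles := by
  intro tablero _ hpre
  unfold Spec_numero_posibles
  rw [numero_posibles_eq_outSum, alt_eq_count3]
  rcases hpre with hrect | hshort | ⟨h2, _⟩
  · rw [outSum_eq_count3 tablero (tablero.headD []).length hrect rfl tablero 0 (by simp)]
  · rw [outSum_self_short tablero (by omega), count3_short tablero (by omega)]
  · rw [outSum_self_short tablero (by omega), count3_short tablero (by omega)]
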